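-- pv_equiv track=rewrite | github.com/DPNT-Sourcecode/CHK-shnn01 | lib/solutions/CHK/checkout_solution.py | apply_misc_offer
-- ===== SOURCE A (Python) =====
-- prices = {"A": 50, "B": 30, "C": 20, "D": 15, "E":40, "F":10, "G":20, "H":10, "I":35, "J":60, "K":70, "L":90,
--           "M":15, "N":40, "O":10, "P":50, "Q":30, "R":50, "S":20, "T":20, "U":40, "V":50, "W":20, "X":17, "Y":20, "Z":21}
--
-- def apply_misc_offer(skus:list[str])->tuple[int, list[str]]:
--     group_size, group_price = 3, 45
--     misc_group = list("STXYZ")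
--     misc_offer, all_else = [], []
--
--     for item in skus:
--         misc_offer.append(item) if item in misc_group else all_else.append(item)
--
--     # It is in the customer's best interest to discount more expensive items so sorting is done to ensure that only the cheapest items remain
--     # for example, STXS test case returns 62 instead of 65. The grouping is done such that X remains.
--     misc_offer = sorted(misc_offer, key=prices.get)
--
--     groups = len(misc_offer) // group_size
--     price = groups * group_price
--
--     remainder_ind = len(misc_offer) % group_size
--     # add remaining elements back into sku pool to be processes as normal
--     remainder = misc_offer[0:remainder_ind]
--     all_else.extend(remainder)
--     return price, all_else
-- ===== SOURCE B (Python) =====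
-- def apply_misc_offer(skus: list[str]) -> tuple[int, list[str]]:
--     # One pass, no sort needed: the five misc items fall into three fixed price tiers
--     # (X=17 < S=T=Y=20 < Z=21), so the stable price-sorted misc list is just
--     # all X's, then the S/T/Y items in input order, then all Z's.
--     all_else = []
--     x_count = z_count = 0
--     sty = []
--     for item in skus:
--         if item == "X":
--             x_count += 1
--         elif item == "Z":
--             z_count += 1
--         elif item == "S" or item == "T" or item == "Y":
--             sty.append(item)
--         else:
--             all_else.append(item)
--     total = x_count + len(sty) + z_count
--     price = (total // 3) * 45
--     rem = total % 3
--     remainder = (["X"] * x_count + sty + ["Z"] * z_count)[:rem]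
--     return price, all_else + remainder
-- ===== Notes on version B (the rewrite author's own statement) =====
-- stated objective: alternative
-- what changed: Replaced partition + stable price-keyed sort of the misc items by a single counting pass over the three fixed price tiers (X / S,T,Y / Z), so the sort disappears and the remainder is read off the tier counts.
import Mathlib
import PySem

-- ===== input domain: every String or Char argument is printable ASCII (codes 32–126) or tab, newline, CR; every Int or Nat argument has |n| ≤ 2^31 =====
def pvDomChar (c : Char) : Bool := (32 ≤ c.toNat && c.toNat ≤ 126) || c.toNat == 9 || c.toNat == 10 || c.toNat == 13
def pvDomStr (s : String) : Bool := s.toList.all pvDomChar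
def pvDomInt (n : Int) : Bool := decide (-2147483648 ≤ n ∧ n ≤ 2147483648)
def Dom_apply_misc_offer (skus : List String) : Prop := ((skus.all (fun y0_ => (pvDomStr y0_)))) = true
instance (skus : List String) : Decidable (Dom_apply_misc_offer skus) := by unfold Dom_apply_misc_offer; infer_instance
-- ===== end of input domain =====

-- B replaces A's partition + stable price-keyed sort of the misc items by one counting pass
-- over the three fixed price tiers (X < S,T,Y < Z); objective: alternative (no sort needed).

-- ===== PORT A =====
def pvPrices : PySem.Dict String Int := PySem.Dict.ofList
  [("A",50),("B",30),("C",20),("D",15),("E",40),("F",10),("G",20),("H",10),("I",35),("J",60),("K",70),("L",90),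
   ("M",15),("N",40),("O",10),("P",50),("Q",30),("R",50),("S",20),("T",20),("U",40),("V",50),("W",20),("X",17),("Y",20),("Z",21)]

-- prices.get as A's sort key: every item A sorts is in misc_group, a subset of prices'
-- keys, so the default 0 is never the key of a sorted element (exact on reachable inputs).
def pvKey (item : String) : Int := PySem.Dict.getD pvPrices item 0

def apply_misc_offer (skus : List String) : Int × List String :=
  let group_size : Int := 3
  let group_price : Int := 45
  let misc_group : List String := ["S","T","X","Y","Z"]
  let st := skus.foldl (fun (acc : List String × List String) item =>
      if item ∈ misc_group then (acc.1 ++ [item], acc.2) else (acc.1, acc.2 ++ [item]))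
    ([], [])
  let misc_offer := PySem.List.sorted st.1 pvKey
  let groups := PySem.Int.floordiv (misc_offer.length : Int) group_size
  let price := groups * group_price
  let remainder_ind := PySem.Int.mod (misc_offer.length : Int) group_size
  let remainder := PySem.List.slice misc_offer (some 0) (some remainder_ind)
  (price, st.2 ++ remainder)

-- ===== PORT B =====
def apply_misc_offer_alt (skus : List String) : Int × List String :=
  let st := skus.foldl (fun (s : List String × Nat × List String × Nat) item =>
      if item = "X" then (s.1, s.2.1 + 1, s.2.2.1, s.2.2.2)
      else if item = "Z" then (s.1, s.2.1, s.2.2.1, s.2.2.2 + 1)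
      else if item = "S" ∨ item = "T" ∨ item = "Y" then (s.1, s.2.1, s.2.2.1 ++ [item], s.2.2.2)
      else (s.1 ++ [item], s.2.1, s.2.2.1, s.2.2.2))
    ([], 0, [], 0)
  let total : Int := ((st.2.1 + st.2.2.1.length + st.2.2.2 : Nat) : Int)
  let price := PySem.Int.floordiv total 3 * 45
  let rem := PySem.Int.mod total 3
  let remainder := PySem.List.slice
    (List.replicate st.2.1 "X" ++ st.2.2.1 ++ List.replicate st.2.2.2 "Z") (some 0) (some rem)
  (price, st.1 ++ remainder)

-- ===== PRECONDITION & SPEC =====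
def Spec_apply_misc_offer (skus : List String) (out : Int × List String) : Prop := out = apply_misc_offer_alt skus
instance (skus : List String) (out : Int × List String) : Decidable (Spec_apply_misc_offer skus out) := by unfold Spec_apply_misc_offer; infer_instance

-- ===== CLAIM (what is proved, stated in full; the proofs are below) =====
def Claim_equal_apply_misc_offer : Prop := ∀ (skus : List String), Dom_apply_misc_offer skus → Spec_apply_misc_offer skus (apply_misc_offer skus)

-- ===== LEMMAS AND PROOFS =====

-- A's partition loop, characterised by filters.
theorem pvLoopA (skus m e : List String) :
    skus.foldl (fun (acc : List String × List String) item =>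
      if item ∈ (["S","T","X","Y","Z"] : List String) then (acc.1 ++ [item], acc.2) else (acc.1, acc.2 ++ [item])) (m, e)
    = (m ++ skus.filter (fun x => decide (x ∈ (["S","T","X","Y","Z"] : List String))),
       e ++ skus.filter (fun x => !decide (x ∈ (["S","T","X","Y","Z"] : List String)))) := by
  induction skus generalizing m e with
  | nil => simp
  | cons x t ih =>
    simp only [List.foldl_cons, List.filter_cons]
    by_cases h : x ∈ (["S","T","X","Y","Z"] : List String)
    · rw [if_pos h, ih]
      simp [h, List.append_assoc]
    · rw [if_neg h, ih]
      simp [h, List.append_assoc]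

-- B's counting loop, characterised by filters/counts.
theorem pvLoopB (skus : List String) (ae sty : List String) (cx cz : Nat) :
    skus.foldl (fun (s : List String × Nat × List String × Nat) item =>
      if item = "X" then (s.1, s.2.1 + 1, s.2.2.1, s.2.2.2)
      else if item = "Z" then (s.1, s.2.1, s.2.2.1, s.2.2.2 + 1)
      else if item = "S" ∨ item = "T" ∨ item = "Y" then (s.1, s.2.1, s.2.2.1 ++ [item], s.2.2.2)
      else (s.1 ++ [item], s.2.1, s.2.2.1, s.2.2.2)) (ae, cx, sty, cz)
    = (ae ++ skus.filter (fun x => !decide (x ∈ (["S","T","X","Y","Z"] : List String))),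
       cx + skus.count "X",
       sty ++ skus.filter (fun x => decide (x = "S" ∨ x = "T" ∨ x = "Y")),
       cz + skus.count "Z") := by
  induction skus generalizing ae sty cx cz with
  | nil => simp
  | cons x t ih =>
    simp only [List.foldl_cons, List.filter_cons, List.count_cons]
    by_cases hX : x = "X"
    · subst hX
      rw [if_pos rfl, ih]
      simp [Nat.add_comm, Nat.add_left_comm]
    · by_cases hZ : x = "Z"
      · subst hZ
        rw [if_neg (by decide), if_pos rfl, ih]
        simp [Nat.add_comm, Nat.add_left_comm]
      · by_cases hS : x = "S" ∨ x = "T" ∨ x = "Y"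
        · have hx : x ∈ (["S","T","X","Y","Z"] : List String) := by
            rcases hS with h | h | h <;> subst h <;> decide
          rw [if_neg hX, if_neg hZ, if_pos hS, ih]
          simp [hX, hZ, hS, hx, List.append_assoc]
        · have hx : x ∉ (["S","T","X","Y","Z"] : List String) := by
            simp only [List.mem_cons, List.not_mem_nil, or_false, not_or]
            exact ⟨fun h => hS (Or.inl h), fun h => hS (Or.inr (Or.inl h)), hX,
                   fun h => hS (Or.inr (Or.inr h)), hZ⟩
          rw [if_neg hX, if_neg hZ, if_neg hS, ih]
          simp [hX, hZ, hS, hx, List.append_assoc]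

-- insertBy passes over a prefix it does not go before
theorem pvInsertBy_append {α : Type} (before : α → α → Bool) (x : α) (L R : List α)
    (h : ∀ y ∈ L, before x y = false) :
    PySem.List.insertBy before x (L ++ R) = L ++ PySem.List.insertBy before x R := by
  induction L with
  | nil => simp
  | cons y t ih =>
    simp only [List.cons_append, PySem.List.insertBy, h y (by simp)]
    simp only [Bool.false_eq_true, if_false, List.cons.injEq, true_and]
    exact ih (fun z hz => h z (by simp [hz]))

-- insertBy goes to the front when it precedes every element
theorem pvInsertBy_front {α : Type} (before : α → α → Bool) (x : α) (R : List α)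
    (h : ∀ y ∈ R, before x y = true) :
    PySem.List.insertBy before x R = x :: R := by
  cases R with
  | nil => rfl
  | cons y t => simp [PySem.List.insertBy, h y (by simp)]

-- The stable sort of a misc list is: the X's, then the S/T/Y's in order, then the Z's.
theorem pvSortChar (ms : List String) (hm : ∀ x ∈ ms, x ∈ (["S","T","X","Y","Z"] : List String)) :
    PySem.List.sorted ms pvKey
    = ms.filter (fun x => decide (x = "X"))
      ++ ms.filter (fun x => decide (x = "S" ∨ x = "T" ∨ x = "Y"))
      ++ ms.filter (fun x => decide (x = "Z")) := by
  induction ms using List.reverseRecOn with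
  | nil => simp [PySem.List.sorted]
  | append_singleton t x ih =>
    have ht : ∀ y ∈ t, y ∈ (["S","T","X","Y","Z"] : List String) :=
      fun y hy => hm y (by simp [hy])
    have hx := hm x (by simp)
    rw [PySem.List.sorted_eq_foldl_insertBy, List.foldl_append,
        ← PySem.List.sorted_eq_foldl_insertBy, ih ht]
    simp only [List.foldl_cons, List.foldl_nil, List.filter_append, List.filter_cons,
      List.filter_nil]
    have key1 : ∀ y ∈ t.filter (fun x => decide (x = "X")), pvKey y = 17 := by
      intro y hy; have := List.of_mem_filter hy; simp at this; subst this; decide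
    have key2 : ∀ y ∈ t.filter (fun x => decide (x = "S" ∨ x = "T" ∨ x = "Y")), pvKey y = 20 := by
      intro y hy; have := List.of_mem_filter hy; simp at this
      rcases this with h | h | h <;> subst h <;> decide
    have key3 : ∀ y ∈ t.filter (fun x => decide (x = "Z")), pvKey y = 21 := by
      intro y hy; have := List.of_mem_filter hy; simp at this; subst this; decide
    simp at hx
    rcases hx with h | h | h | h | h <;> subst h
    · -- x = "S": between the X block and the Z block
      have hA : ∀ y ∈ t.filter (fun x => decide (x = "X"))
          ++ t.filter (fun x => decide (x = "S" ∨ x = "T" ∨ x = "Y")),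
          decide (pvKey "S" < pvKey y) = false := by
        intro y hy
        rcases List.mem_append.mp hy with hy | hy
        · rw [key1 y hy]; decide
        · rw [key2 y hy]; decide
      have hB : ∀ y ∈ t.filter (fun x => decide (x = "Z")),
          decide (pvKey "S" < pvKey y) = true := by
        intro y hy; rw [key3 y hy]; decide
      rw [pvInsertBy_append _ _ _ _ hA, pvInsertBy_front _ _ _ hB]
      simp [List.append_assoc]
    · -- x = "T"
      have hA : ∀ y ∈ t.filter (fun x => decide (x = "X"))
          ++ t.filter (fun x => decide (x = "S" ∨ x = "T" ∨ x = "Y")),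
          decide (pvKey "T" < pvKey y) = false := by
        intro y hy
        rcases List.mem_append.mp hy with hy | hy
        · rw [key1 y hy]; decide
        · rw [key2 y hy]; decide
      have hB : ∀ y ∈ t.filter (fun x => decide (x = "Z")),
          decide (pvKey "T" < pvKey y) = true := by
        intro y hy; rw [key3 y hy]; decide
      rw [pvInsertBy_append _ _ _ _ hA, pvInsertBy_front _ _ _ hB]
      simp [List.append_assoc]
    · -- x = "X": after the existing X block
      have hA : ∀ y ∈ t.filter (fun x => decide (x = "X")),
          decide (pvKey "X" < pvKey y) = false := by
        intro y hy; rw [key1 y hy]; decide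
      have hB : ∀ y ∈ t.filter (fun x => decide (x = "S" ∨ x = "T" ∨ x = "Y"))
          ++ t.filter (fun x => decide (x = "Z")),
          decide (pvKey "X" < pvKey y) = true := by
        intro y hy
        rcases List.mem_append.mp hy with hy | hy
        · rw [key2 y hy]; decide
        · rw [key3 y hy]; decide
      rw [List.append_assoc, pvInsertBy_append _ _ _ _ hA, pvInsertBy_front _ _ _ hB]
      simp [List.append_assoc]
    · -- x = "Y"
      have hA : ∀ y ∈ t.filter (fun x => decide (x = "X"))
          ++ t.filter (fun x => decide (x = "S" ∨ x = "T" ∨ x = "Y")),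
          decide (pvKey "Y" < pvKey y) = false := by
        intro y hy
        rcases List.mem_append.mp hy with hy | hy
        · rw [key1 y hy]; decide
        · rw [key2 y hy]; decide
      have hB : ∀ y ∈ t.filter (fun x => decide (x = "Z")),
          decide (pvKey "Y" < pvKey y) = true := by
        intro y hy; rw [key3 y hy]; decide
      rw [pvInsertBy_append _ _ _ _ hA, pvInsertBy_front _ _ _ hB]
      simp [List.append_assoc]
    · -- x = "Z": at the very end
      have hA : ∀ y ∈ t.filter (fun x => decide (x = "X"))
          ++ t.filter (fun x => decide (x = "S" ∨ x = "T" ∨ x = "Y"))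
          ++ t.filter (fun x => decide (x = "Z")),
          decide (pvKey "Z" < pvKey y) = false := by
        intro y hy
        simp only [List.mem_append] at hy
        rcases hy with (hy | hy) | hy
        · rw [key1 y hy]; decide
        · rw [key2 y hy]; decide
        · rw [key3 y hy]; decide
      rw [PySem.List.insertBy_of_forall_not_before _ _ _ hA]
      simp [List.append_assoc]

-- ===== VERDICT (by name: the statement is the Claim_ definition above) =====
theorem apply_misc_offer_spec : Claim_equal_apply_misc_offer := by
  intro skus _
  unfold Spec_apply_misc_offer
  simp only [apply_misc_offer, apply_misc_offer_alt]
  rw [pvLoopA, pvLoopB]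
  simp only [List.nil_append, Nat.zero_add]
  have hmem : ∀ x ∈ skus.filter (fun x => decide (x ∈ (["S","T","X","Y","Z"] : List String))),
      x ∈ (["S","T","X","Y","Z"] : List String) := fun x hx => by
    have := List.of_mem_filter hx; simpa using this
  rw [pvSortChar _ hmem]
  have hff : ∀ (p : String → Bool), (∀ x, p x = true → x ∈ (["S","T","X","Y","Z"] : List String)) →
      (skus.filter (fun x => decide (x ∈ (["S","T","X","Y","Z"] : List String)))).filter p
        = skus.filter p := by
    intro p hp
    rw [List.filter_filter]
    apply List.filter_congr
    intro x _
    by_cases h : p x = true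
    · simp [h, hp x h]
    · simp [Bool.eq_false_iff.mpr h]
  have hlist : (skus.filter (fun x => decide (x ∈ (["S","T","X","Y","Z"] : List String)))).filter
        (fun x => decide (x = "X"))
      ++ (skus.filter (fun x => decide (x ∈ (["S","T","X","Y","Z"] : List String)))).filter
        (fun x => decide (x = "S" ∨ x = "T" ∨ x = "Y"))
      ++ (skus.filter (fun x => decide (x ∈ (["S","T","X","Y","Z"] : List String)))).filter
        (fun x => decide (x = "Z"))
      = List.replicate (skus.count "X") "X"
        ++ skus.filter (fun x => decide (x = "S" ∨ x = "T" ∨ x = "Y"))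
        ++ List.replicate (skus.count "Z") "Z" := by
    rw [hff _ (by intro x h; simp at h; subst h; decide),
        hff _ (by intro x h; simp at h; rcases h with h | h | h <;> subst h <;> decide),
        hff _ (by intro x h; simp at h; subst h; decide),
        List.filter_eq "X", List.filter_eq "Z"]
  rw [hlist]
  have hlen : (List.replicate (skus.count "X") "X"
      ++ skus.filter (fun x => decide (x = "S" ∨ x = "T" ∨ x = "Y"))
      ++ List.replicate (skus.count "Z") "Z").length
      = skus.count "X" + (skus.filter (fun x => decide (x = "S" ∨ x = "T" ∨ x = "Y"))).length
        + skus.count "Z" := by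
    simp
    omega
  rw [hlen]
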